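-- pv_equiv track=rewrite | github.com/storedspace/Web-Search-and-Mining | retrieved top 10 relevant docs/util.py | check
-- ===== SOURCE A (Python) =====
-- def check(num,tuple_list):
--     my_list = []
--     count = 0
--     if num == 0:
--         my_list = ["News123256","News119356","News111959","News115859","News120265","News119746","News101763","News108578","News107163","News122750"]
--     if num == 1:
--         my_list = ["News107883","News108482","News109808","News110033","News110141","News110871","News108024","News108653","News108964","News110211"]
--     if num == 2:
--         my_list = ["News108813","News104913","News116613","News103134","News116634","News103728","News110804","News121995","News118108","News103767"]
--     if num == 3:
--         my_list = ["News107883","News110329","News110871","News108482","News105142","News110514","News110033","News110804","News110141","News111579"]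
--     for newsid in tuple_list:
--         if newsid[0] in my_list:
--             count+=1
--     return count
-- ===== SOURCE B (Python) =====
-- _TARGETS = {
--     0: ["News123256","News119356","News111959","News115859","News120265","News119746","News101763","News108578","News107163","News122750"],
--     1: ["News107883","News108482","News109808","News110033","News110141","News110871","News108024","News108653","News108964","News110211"],
--     2: ["News108813","News104913","News116613","News103134","News116634","News103728","News110804","News121995","News118108","News103767"],
--     3: ["News107883","News110329","News110871","News108482","News105142","News110514","News110033","News110804","News110141","News111579"],
-- }
--
-- def check(num, tuple_list):
--     # sort both sides, then count matches with a two-pointer merge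
--     xs = sorted(t[0] for t in tuple_list)
--     ys = sorted(_TARGETS.get(num, []))
--     count = i = j = 0
--     while i < len(xs) and j < len(ys):
--         if xs[i] < ys[j]:
--             i += 1
--         elif ys[j] < xs[i]:
--             j += 1
--         else:
--             count += 1
--             i += 1
--     return count
-- ===== Notes on version B (the rewrite author's own statement) =====
-- stated objective: alternative
-- what changed: B sorts the first-column ids and the (sorted) target list and counts matches with a two-pointer merge, instead of A's per-tuple list-membership scan; correct because each target list is duplicate-free, so the merge counts every matching tuple exactly once.
import Mathlib
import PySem

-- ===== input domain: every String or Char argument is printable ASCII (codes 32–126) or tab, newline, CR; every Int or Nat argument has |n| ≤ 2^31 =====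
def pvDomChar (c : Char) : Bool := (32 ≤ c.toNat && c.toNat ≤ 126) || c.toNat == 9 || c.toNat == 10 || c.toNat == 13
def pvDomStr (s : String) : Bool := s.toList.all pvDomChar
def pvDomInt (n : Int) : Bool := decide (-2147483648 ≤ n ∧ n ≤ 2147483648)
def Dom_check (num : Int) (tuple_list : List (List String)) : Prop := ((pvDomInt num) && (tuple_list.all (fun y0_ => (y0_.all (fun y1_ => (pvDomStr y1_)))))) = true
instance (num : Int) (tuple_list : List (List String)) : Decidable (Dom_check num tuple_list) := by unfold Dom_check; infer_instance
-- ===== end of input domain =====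

-- B replaces A's membership scan by sort-both-sides + two-pointer merge counting (return value only; not faster here).

-- ===== PORT A =====
def check (num : Int) (tuple_list : List (List String)) : Int :=
  let my_list : List String := []
  let my_list := if num = 0 then ["News123256","News119356","News111959","News115859","News120265","News119746","News101763","News108578","News107163","News122750"] else my_list
  let my_list := if num = 1 then ["News107883","News108482","News109808","News110033","News110141","News110871","News108024","News108653","News108964","News110211"] else my_list
  let my_list := if num = 2 then ["News108813","News104913","News116613","News103134","News116634","News103728","News110804","News121995","News118108","News103767"] else my_list
  let my_list := if num = 3 then ["News107883","News110329","News110871","News108482","News105142","News110514","News110033","News110804","News110141","News111579"] else my_list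
  tuple_list.foldl (fun count newsid =>
    if my_list.contains (PySem.List.pyGetD newsid 0 "") then count + 1 else count) 0

-- ===== PORT B =====
-- the module-level _TARGETS dict of Source B
def pvTargets : PySem.Dict Int (List String) := PySem.Dict.ofList
  [ (0, ["News123256","News119356","News111959","News115859","News120265","News119746","News101763","News108578","News107163","News122750"])
  , (1, ["News107883","News108482","News109808","News110033","News110141","News110871","News108024","News108653","News108964","News110211"])
  , (2, ["News108813","News104913","News116613","News103134","News116634","News103728","News110804","News121995","News118108","News103767"])
  , (3, ["News107883","News110329","News110871","News108482","News105142","News110514","News110033","News110804","News110141","News111579"]) ]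

-- Source B's while loop over indices i, j, transliterated as recursion on the suffixes xs[i:], ys[j:]
def pvMergeCount : List String → List String → Int
  | [], _ => 0
  | _ :: _, [] => 0
  | x :: xs, y :: ys =>
    if x < y then pvMergeCount xs (y :: ys)
    else if y < x then pvMergeCount (x :: xs) ys
    else 1 + pvMergeCount xs (y :: ys)
termination_by xs ys => xs.length + ys.length
decreasing_by all_goals simp only [List.length_cons]; omega

def check_alt (num : Int) (tuple_list : List (List String)) : Int :=
  let xs := PySem.List.sorted (tuple_list.map (fun t => PySem.List.pyGetD t 0 "")) (fun x => x) false
  let ys := PySem.List.sorted (pvTargets.getD num []) (fun x => x) false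
  pvMergeCount xs ys

-- ===== PRECONDITION & SPEC =====
-- Pre_ excludes tuple_list containing an empty tuple: there A raises IndexError on newsid[0] (and B on t[0]).
def Pre_check (num : Int) (tuple_list : List (List String)) : Prop :=
  ∀ t ∈ tuple_list, t ≠ []
instance (num : Int) (tuple_list : List (List String)) : Decidable (Pre_check num tuple_list) := by unfold Pre_check; infer_instance

def pvWitness_check : Int × List (List String) := (1, [["News107883", "x"], ["News999999"]])

def Spec_check (num : Int) (tuple_list : List (List String)) (out : Int) : Prop := out = check_alt num tuple_list
instance (num : Int) (tuple_list : List (List String)) (out : Int) : Decidable (Spec_check num tuple_list out) := by unfold Spec_check; infer_instance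

-- ===== CLAIM (what is proved, stated in full; the proofs are below) =====
def Claim_equal_check : Prop := ∀ (num : Int) (tuple_list : List (List String)), Dom_check num tuple_list → Pre_check num tuple_list → Spec_check num tuple_list (check num tuple_list)

-- ===== LEMMAS AND PROOFS =====

-- two-pointer merge counting over a ≤-sorted xs and a <-sorted ys counts the xs elements lying in ys
theorem pv_mergeCount_eq (xs ys : List String)
    (hxs : xs.Pairwise (· ≤ ·)) (hys : ys.Pairwise (· < ·)) :
    pvMergeCount xs ys = (xs.countP (fun x => ys.contains x) : Int) := by
  fun_induction pvMergeCount xs ys with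
  | case1 ys => simp
  | case2 x xs => simp
  | case3 x xs y ys hlt ih =>
    have hnotin : x ∉ y :: ys := by
      intro hmem
      rcases List.mem_cons.mp hmem with h | h
      · subst h; exact lt_irrefl _ hlt
      · exact absurd (lt_trans hlt ((List.pairwise_cons.mp hys).1 _ h)) (lt_irrefl x)
    have hne : x ≠ y := fun h => hnotin (by simp [h])
    have hni : x ∉ ys := fun h => hnotin (List.mem_cons_of_mem _ h)
    rw [ih hxs.of_cons hys]
    simp [hne, hni]
  | case4 x xs y ys hnlt hlt ih =>
    have hcong : ∀ z ∈ x :: xs, ((y :: ys).contains z) = (ys.contains z) := by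
      intro z hz
      have hxz : x ≤ z := by
        rcases List.mem_cons.mp hz with h | h
        · simp [h]
        · exact (List.pairwise_cons.mp hxs).1 _ h
      have : z ≠ y := fun h => absurd (lt_of_lt_of_le hlt hxz) (by simp [h])
      simp [this]
    have hcp : (x :: xs).countP (fun z => (y :: ys).contains z)
        = (x :: xs).countP (fun z => ys.contains z) :=
      List.countP_congr (fun z hz => by rw [hcong z hz])
    rw [ih hxs hys.of_cons, hcp]
  | case5 x xs y ys hnlt hngt ih =>
    have hxy : x = y := le_antisymm (not_lt.mp hngt) (not_lt.mp hnlt)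
    rw [ih hxs.of_cons hys]
    simp [hxy]
    omega

-- one target list: A's fold over tuple_list equals B's merge count (m the literal target list, nodup)
theorem pv_main (m : List String) (hm : m.Nodup) (tuple_list : List (List String)) :
    tuple_list.foldl (fun count newsid =>
        if m.contains (PySem.List.pyGetD newsid 0 "") then count + 1 else count) 0
    = pvMergeCount
        (PySem.List.sorted (tuple_list.map (fun t => PySem.List.pyGetD t 0 "")) (fun x => x) false)
        (PySem.List.sorted m (fun x => x) false) := by
  set fs := tuple_list.map (fun t => PySem.List.pyGetD t 0 "") with hfs
  have hsx : (PySem.List.sorted fs (fun x => x) false).Pairwise (· ≤ ·) :=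
    PySem.List.sorted_pairwise fs (fun x => x)
  have hsy : (PySem.List.sorted m (fun x => x) false).Pairwise (· < ·) := by
    have hle := PySem.List.sorted_pairwise m (fun x => x)
    have hnd : (PySem.List.sorted m (fun x => x) false).Nodup :=
      (PySem.List.sorted_perm m (fun x => x) false).nodup_iff.mpr hm
    exact List.Pairwise.imp₂ (fun a b hab hne => lt_of_le_of_ne hab hne) hle hnd
  rw [pv_mergeCount_eq _ _ hsx hsy]
  have hmemy : ∀ z, (PySem.List.sorted m (fun x => x) false).contains z = m.contains z := by
    intro z
    simp [PySem.List.mem_sorted]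
  have hcnt : (PySem.List.sorted fs (fun x => x) false).countP
      (fun x => (PySem.List.sorted m (fun x => x) false).contains x)
      = fs.countP (fun x => m.contains x) := by
    rw [List.countP_congr (fun z _ => by rw [hmemy z])]
    exact (PySem.List.sorted_perm fs (fun x => x) false).countP_eq _
  rw [hcnt, PySem.List.foldl_if_add_one, hfs, List.countP_map]
  simp [Function.comp_def]

-- ===== VERDICT (by name: the statement is the Claim_ definition above) =====
theorem check_spec : Claim_equal_check := by
  intro num tuple_list _ _
  unfold Spec_check check check_alt
  by_cases h0 : num = 0
  · subst h0; exact pv_main _ (by decide) tuple_list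
  by_cases h1 : num = 1
  · subst h1; exact pv_main _ (by decide) tuple_list
  by_cases h2 : num = 2
  · subst h2; exact pv_main _ (by decide) tuple_list
  by_cases h3 : num = 3
  · subst h3; exact pv_main _ (by decide) tuple_list
  · simp only [h0, h1, h2, h3, if_false]
    have hempty : pvTargets.getD num [] = [] := by
      simp [pvTargets, PySem.Dict.ofList, PySem.Dict.update, PySem.Dict.getD_insert,
        PySem.Dict.getD_empty, h0, h1, h2, h3]
    have h2 : ∀ l : List String, pvMergeCount l [] = 0 := by
      intro l; cases l <;> simp [pvMergeCount]
    have hs : PySem.List.sorted ([] : List String) (fun x => x) false = [] := rfl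
    rw [hempty, hs, h2]
    simp
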